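-- pv_equiv track=rewrite | github.com/rfypych/cacti-autodata | verify_accuracy.py | group_by_y
-- ===== SOURCE A (Python) =====
-- from collections import defaultdict
--
-- def group_by_y(uses, tolerance=2):
--     groups = defaultdict(list)
--     for glyph_id, x, y in uses:
--         y_key = round(y / tolerance) * tolerance
--         groups[y_key].append((x, glyph_id))
--     for k in groups:
--         groups[k].sort()
--     return dict(sorted(groups.items()))
-- ===== SOURCE B (Python) =====
-- def group_by_y(uses, tolerance=2):
--     # One global sort of (y_key, x, glyph_id) records, then a single
--     # run-grouping pass; no dict bucketing, no per-bucket sorts, no key sort.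
--     decorated = sorted((round(y / tolerance) * tolerance, x, glyph_id)
--                        for glyph_id, x, y in uses)
--     result = {}
--     i, n = 0, len(decorated)
--     while i < n:
--         k = decorated[i][0]
--         group = []
--         while i < n and decorated[i][0] == k:
--             group.append((decorated[i][1], decorated[i][2]))
--             i += 1
--         result[k] = group
--     return result
-- ===== Notes on version B (the rewrite author's own statement) =====
-- stated objective: alternative
-- what changed: Instead of bucketing into a defaultdict and then sorting every bucket and the key list, B decorates each record with its y_key, performs ONE global sort by (y_key, x, glyph_id) and emits the groups in a single linear run-grouping pass over the sorted list.
import Mathlib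
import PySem

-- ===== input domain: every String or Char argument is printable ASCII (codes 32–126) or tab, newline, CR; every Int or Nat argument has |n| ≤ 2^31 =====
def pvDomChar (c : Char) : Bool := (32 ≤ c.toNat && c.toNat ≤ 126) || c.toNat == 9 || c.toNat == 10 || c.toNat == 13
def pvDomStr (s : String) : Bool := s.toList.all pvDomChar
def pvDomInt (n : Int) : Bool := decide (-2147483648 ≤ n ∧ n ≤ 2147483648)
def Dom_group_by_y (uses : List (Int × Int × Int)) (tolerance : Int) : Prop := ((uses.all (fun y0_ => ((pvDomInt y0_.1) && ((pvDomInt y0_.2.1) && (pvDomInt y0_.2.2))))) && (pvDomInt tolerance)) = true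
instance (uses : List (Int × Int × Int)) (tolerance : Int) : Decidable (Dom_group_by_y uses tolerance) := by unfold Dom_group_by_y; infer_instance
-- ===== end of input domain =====

-- B replaces A's dict-bucketing + per-bucket sorts + key sort by one global
-- lexicographic sort of (y_key, x, glyph_id) records followed by a single
-- run-grouping pass (alternative decomposition, same asymptotic cost).


-- ===== PORT A =====
-- Models Python's `round(y / tolerance) * tolerance` (t ≠ 0): round-half-even of
-- the rational y/t, times t.  Exact on the Dom range |y|,|t| ≤ 2^31: there the
-- float quotient rounds/ties exactly as the rational does (both programs compute
-- this same expression, so the helper is shared by the two ports).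
def yKey (y t : Int) : Int :=
  let n : Int := if 0 < t then y else -y
  let d : Int := if 0 < t then t else -t
  let q : Int := PySem.Int.floordiv n d
  let r2 : Int := 2 * (n - q * d)
  (if r2 < d then q else if d < r2 then q + 1 else if q % 2 = 0 then q else q + 1) * t

def group_by_y (uses : List (Int × Int × Int)) (tolerance : Int) : List (Int × List (Int × Int)) :=
  -- groups = defaultdict(list); for glyph_id, x, y in uses: groups[y_key].append((x, glyph_id))
  let groups : PySem.Dict Int (List (Int × Int)) :=
    uses.foldl (fun d u => d.modify (yKey u.2.2 tolerance) [] (fun l => l ++ [(u.2.1, u.1)])) PySem.Dict.empty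
  -- for k in groups: groups[k].sort()   (lists of int pairs sort lexicographically)
  let sortedVals : PySem.Dict Int (List (Int × Int)) :=
    PySem.Dict.mk (groups.items.map (fun p => (p.1, PySem.List.sorted2 p.2 (fun q => q.1) (fun q => q.2))))
  -- dict(sorted(groups.items())): dict keys are distinct, so the tuple comparison
  -- never reaches the list component — sorting by the key alone is exact.
  PySem.List.sorted sortedVals.items (fun p => p.1)

-- ===== PORT B =====
def lexKey (u : Int × Int × Int) : Lex (Int × Lex (Int × Int)) := toLex (u.1, toLex (u.2.1, u.2.2))

-- the inner while-loop run-grouping pass of Source B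
def groupRuns : List (Int × Int × Int) → List (Int × List (Int × Int))
  | [] => []
  | u :: rest =>
      (u.1, u.2 :: (rest.takeWhile (fun v => v.1 == u.1)).map (fun v => v.2)) ::
        groupRuns (rest.dropWhile (fun v => v.1 == u.1))
  termination_by l => l.length
  decreasing_by
    simpa using Nat.lt_succ_of_le (List.length_dropWhile_le _ _)

def group_by_y_alt (uses : List (Int × Int × Int)) (tolerance : Int) : List (Int × List (Int × Int)) :=
  -- decorated = sorted((y_key, x, glyph_id) ...): Python's tuple comparison on
  -- int triples is the lexicographic order lexKey
  let decorated := PySem.List.sorted (uses.map (fun u => (yKey u.2.2 tolerance, u.2.1, u.1))) lexKey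
  groupRuns decorated

-- ===== PRECONDITION & SPEC =====
-- tolerance = 0 with a nonempty uses list makes Python's `y / tolerance` raise
-- ZeroDivisionError (in A and in B alike); on empty uses no division happens.
def Pre_group_by_y (uses : List (Int × Int × Int)) (tolerance : Int) : Prop := uses = [] ∨ tolerance ≠ 0
instance (uses : List (Int × Int × Int)) (tolerance : Int) : Decidable (Pre_group_by_y uses tolerance) := by unfold Pre_group_by_y; infer_instance
def pvWitness_group_by_y : (List (Int × Int × Int)) × Int := ([(1, 2, 3)], 2)

def Spec_group_by_y (uses : List (Int × Int × Int)) (tolerance : Int) (out : List (Int × List (Int × Int))) : Prop := out = group_by_y_alt uses tolerance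
instance (uses : List (Int × Int × Int)) (tolerance : Int) (out : List (Int × List (Int × Int))) : Decidable (Spec_group_by_y uses tolerance out) := by unfold Spec_group_by_y; infer_instance

-- ===== CLAIM (what is proved, stated in full; the proofs are below) =====
def Claim_equal_group_by_y : Prop := ∀ (uses : List (Int × Int × Int)) (tolerance : Int), Dom_group_by_y uses tolerance → Pre_group_by_y uses tolerance → Spec_group_by_y uses tolerance (group_by_y uses tolerance)

-- ===== LEMMAS AND PROOFS =====

-- sorted2 with keys (fst, snd) on Int pairs is the one-key sort under the lexicographic order
lemma sorted2_pairs_eq (xs : List (Int × Int)) :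
    PySem.List.sorted2 xs (fun q => q.1) (fun q => q.2)
      = PySem.List.sorted xs (fun p => toLex (p.1, p.2)) := by
  rw [PySem.List.sorted_eq_foldl_insertBy]
  simp only [PySem.List.sorted2]
  have hc : (fun (a b : Int × Int) => decide (a.1 < b.1) || (!decide (b.1 < a.1) && decide (a.2 < b.2)))
      = fun a b => decide ((toLex (a.1, a.2) : Lex (Int × Int)) < toLex (b.1, b.2)) := by
    funext a b
    rcases lt_trichotomy a.1 b.1 with h | h | h
    · simp [Prod.Lex.lt_iff, h]
    · simp [Prod.Lex.lt_iff, h]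
    · simp only [Prod.Lex.lt_iff]
      simp [h, ne_of_gt h, lt_asymm h]
  rw [hc]
  simp

-- per-key group content: sorting a key's bucket = filtering the globally sorted list at that key
lemma bucket_eq (dec : List (Int × Int × Int)) (k : Int) :
    PySem.List.sorted (((dec.filter (fun v => v.1 == k)).map (fun v => v.2))) (fun p => toLex (p.1, p.2))
      = ((PySem.List.sorted dec lexKey).filter (fun v => v.1 == k)).map (fun v => v.2) := by
  apply PySem.List.eq_of_perm_of_pairwise_le_of_injective (key := fun p : Int × Int => toLex (p.1, p.2))
  · intro p q h
    have := toLex.injective h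
    exact Prod.ext (congrArg Prod.fst this) (congrArg Prod.snd this)
  · exact (PySem.List.sorted_perm _ _ _).trans
      (((PySem.List.sorted_perm dec lexKey false).filter _).map _).symm
  · exact PySem.List.sorted_pairwise _ _
  · rw [List.pairwise_map]
    refine List.Pairwise.imp_of_mem ?_ ((PySem.List.sorted_pairwise dec lexKey).filter _)
    intro a b ha hb hab
    have ha1 : a.1 = k := by simpa using (List.mem_filter.mp ha).2
    have hb1 : b.1 = k := by simpa using (List.mem_filter.mp hb).2
    rcases Prod.Lex.le_iff.mp hab with h | ⟨_, h2⟩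
    · have h' : a.1 < b.1 := h
      omega
    · have h2' : (toLex (a.2.1, a.2.2) : Lex (Int × Int)) ≤ toLex (b.2.1, b.2.2) := h2
      simpa using h2'

-- the run-grouping pass on a fst-sorted list: keys strictly increase, keys are exactly
-- the keys occurring in the list, and each group is the filter at its key
lemma groupRuns_spec : ∀ (S : List (Int × Int × Int)),
    S.Pairwise (fun a b => a.1 ≤ b.1) →
    ((groupRuns S).map (fun p => p.1)).Pairwise (· < ·)
    ∧ (∀ k, k ∈ (groupRuns S).map (fun p => p.1) ↔ k ∈ S.map (fun v => v.1))
    ∧ ∀ p ∈ groupRuns S, p.2 = (S.filter (fun v => v.1 == p.1)).map (fun v => v.2) := by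
  intro S
  induction S using groupRuns.induct with
  | case1 => simp [groupRuns]
  | case2 u rest ih =>
    intro h
    rw [List.pairwise_cons] at h
    obtain ⟨hu, hrest⟩ := h
    have hTD : rest.takeWhile (fun v => v.1 == u.1) ++ rest.dropWhile (fun v => v.1 == u.1) = rest :=
      List.takeWhile_append_dropWhile
    have hDsub : (rest.dropWhile (fun v => v.1 == u.1)).Sublist rest := List.dropWhile_sublist _
    have hDpw : (rest.dropWhile (fun v => v.1 == u.1)).Pairwise (fun a b => a.1 ≤ b.1) :=
      hrest.sublist hDsub
    obtain ⟨ihpw, ihmem, ihgrp⟩ := ih hDpw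
    have hTk : ∀ v ∈ rest.takeWhile (fun v => v.1 == u.1), v.1 = u.1 := fun v hv => by
      simpa using List.mem_takeWhile_imp hv
    have hDgt : ∀ v ∈ rest.dropWhile (fun v => v.1 == u.1), u.1 < v.1 := by
      intro v hv
      have hle : u.1 ≤ v.1 := hu v (hDsub.mem hv)
      rcases hDc : rest.dropWhile (fun v => v.1 == u.1) with _ | ⟨d, D'⟩
      · rw [hDc] at hv; simp at hv
      · have hne : rest.dropWhile (fun v : Int × Int × Int => v.1 == u.1) ≠ [] := by rw [hDc]; simp
        have hhd := List.head_dropWhile_not (fun v : Int × Int × Int => v.1 == u.1) hne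
        simp only [hDc, List.head_cons, beq_eq_false_iff_ne, ne_eq] at hhd
        rw [hDc] at hv
        rcases List.mem_cons.mp hv with rfl | hv'
        · omega
        · have hdv : d.1 ≤ v.1 := by
            have hp := hDpw
            rw [hDc, List.pairwise_cons] at hp
            exact hp.1 v hv'
          have hdin : d ∈ rest.dropWhile (fun v => v.1 == u.1) := by rw [hDc]; simp
          have hdu : u.1 ≤ d.1 := hu d (hDsub.mem hdin)
          omega
    have hkeysD : ∀ k ∈ (groupRuns (rest.dropWhile (fun v => v.1 == u.1))).map (fun p => p.1),
        u.1 < k := by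
      intro k hk
      rcases List.mem_map.mp ((ihmem k).mp hk) with ⟨v, hv, rfl⟩
      exact hDgt v hv
    have hfilT : (rest.takeWhile (fun v => v.1 == u.1)).filter (fun v => v.1 == u.1)
        = rest.takeWhile (fun v => v.1 == u.1) :=
      List.filter_eq_self.mpr (fun v hv => by simpa using hTk v hv)
    have hfilD : ∀ k, u.1 < k →
        (u :: rest).filter (fun v => v.1 == k) = (rest.dropWhile (fun v => v.1 == u.1)).filter (fun v => v.1 == k) := by
      intro k hk
      rw [List.filter_cons, ← hTD, List.filter_append]
      have h1 : (rest.takeWhile (fun v => v.1 == u.1)).filter (fun v => v.1 == k) = [] :=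
        List.filter_eq_nil_iff.mpr (fun v hv => by simp [hTk v hv]; omega)
      simp only [h1, List.nil_append]
      have : (u.1 == k) = false := by simp; omega
      simp [this]
    have hfilS : (u :: rest).filter (fun v => v.1 == u.1)
        = u :: rest.takeWhile (fun v => v.1 == u.1) := by
      rw [List.filter_cons, ← hTD, List.filter_append, hfilT]
      have h2 : (rest.dropWhile (fun v => v.1 == u.1)).filter (fun v => v.1 == u.1) = [] :=
        List.filter_eq_nil_iff.mpr (fun v hv => by have := hDgt v hv; simp; omega)
      simp [h2]
    simp only [groupRuns, List.map_cons]
    refine ⟨?_, ?_, ?_⟩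
    · exact List.pairwise_cons.mpr ⟨hkeysD, ihpw⟩
    · intro k
      simp only [List.mem_cons, List.mem_map]
      constructor
      · rintro (rfl | hk)
        · exact Or.inl rfl
        · rcases hk with ⟨p, hp, rfl⟩
          have : p.1 ∈ (groupRuns (rest.dropWhile (fun v => v.1 == u.1))).map (fun p => p.1) :=
            List.mem_map_of_mem hp
          rcases List.mem_map.mp ((ihmem p.1).mp this) with ⟨v, hv, hveq⟩
          exact Or.inr ⟨v, hDsub.mem hv, hveq⟩
      · rintro (rfl | ⟨v, hv, rfl⟩)
        · exact Or.inl rfl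
        · rw [← hTD] at hv
          rcases List.mem_append.mp hv with hv' | hv'
          · exact Or.inl (hTk v hv')
          · have : v.1 ∈ (groupRuns (rest.dropWhile (fun w => w.1 == u.1))).map (fun p => p.1) :=
              (ihmem v.1).mpr (List.mem_map_of_mem hv')
            rcases List.mem_map.mp this with ⟨p, hp, hpe⟩
            exact Or.inr ⟨p, hp, hpe⟩
    · intro p hp
      rcases List.mem_cons.mp hp with rfl | hp'
      · simp only [hfilS, List.map_cons]
      · have hk : u.1 < p.1 := hkeysD p.1 (List.mem_map_of_mem hp')
        rw [hfilD p.1 hk]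
        exact ihgrp p hp'

-- two strictly increasing Int lists with the same members are equal
lemma keys_unique (l1 l2 : List Int) (h1 : l1.Pairwise (· < ·)) (h2 : l2.Pairwise (· < ·))
    (hm : ∀ k, k ∈ l1 ↔ k ∈ l2) : l1 = l2 := by
  have hperm : l1.Perm l2 :=
    (List.perm_ext_iff_of_nodup (h1.imp ne_of_lt) (h2.imp ne_of_lt)).mpr hm
  have e1 : PySem.List.sorted l2 (fun x => x) = l1 :=
    PySem.List.sorted_eq_of_perm_of_pairwise_lt l2 l1 _ hperm h1
  have e2 : PySem.List.sorted l2 (fun x => x) = l2 :=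
    PySem.List.sorted_eq_of_perm_of_pairwise_lt l2 l2 _ (List.Perm.refl _) h2
  rw [← e1, e2]

-- ===== VERDICT (by name: the statement is the Claim_ definition above) =====
theorem group_by_y_spec : Claim_equal_group_by_y := by
  intro uses t _ _
  show group_by_y uses t = group_by_y_alt uses t
  set f : Int × Int × Int → Int × Int × Int := fun u => (yKey u.2.2 t, u.2.1, u.1) with hf
  set dec : List (Int × Int × Int) := uses.map f with hdec
  set S : List (Int × Int × Int) := PySem.List.sorted dec lexKey with hS
  have hSpw : S.Pairwise (fun a b => a.1 ≤ b.1) := by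
    refine (PySem.List.sorted_pairwise dec lexKey).imp ?_
    intro a b hab
    rcases Prod.Lex.le_iff.mp hab with h | ⟨h, _⟩
    · exact le_of_lt h
    · exact le_of_eq h
  obtain ⟨hpwB, hmemB, hgrpB⟩ := groupRuns_spec S hSpw
  set ks : List Int := PySem.List.sorted (PySem.Set.ofList (dec.map (fun v => v.1))) (fun x => x) with hks
  -- ===== A's side =====
  have hfold : uses.foldl (fun d u => d.modify (yKey u.2.2 t) [] (fun l => l ++ [(u.2.1, u.1)])) PySem.Dict.empty
      = dec.foldl (fun d p => d.modify p.1 [] (fun l => l ++ [p.2])) PySem.Dict.empty := by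
    rw [hdec, List.foldl_map]
  set groups := dec.foldl (fun d p => d.modify p.1 [] (fun l => l ++ [p.2])) PySem.Dict.empty with hgroups
  have hkeys : groups.keys = PySem.Set.ofList (dec.map (fun v => v.1)) := by
    rw [hgroups]
    exact PySem.Dict.keys_foldl_modify_key dec (fun p => p.1) [] (fun _ p => fun l => l ++ [p.2]) PySem.Dict.empty
  have hnodup : groups.keys.Nodup := by
    rw [hgroups]
    exact PySem.Dict.nodup_keys_foldl_modify_key dec (fun p => p.1) [] _ PySem.Dict.empty (by simp [PySem.Dict.keys_empty])
  have hgetD : ∀ k, groups.getD k [] = (dec.filter (fun v => v.1 == k)).map (fun v => v.2) := by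
    intro k
    rw [hgroups, PySem.Dict.getD_foldl_modify_append, PySem.Dict.getD_empty, List.nil_append]
  have hitems : groups.items = (PySem.Set.ofList (dec.map (fun v => v.1))).map
      (fun k => (k, (dec.filter (fun v => v.1 == k)).map (fun v => v.2))) := by
    rw [PySem.Dict.items_eq_map_keys groups hnodup [], hkeys]
    exact List.map_congr_left (fun k _ => by rw [hgetD k])
  have hA : group_by_y uses t = ks.map
      (fun k => (k, PySem.List.sorted2 ((dec.filter (fun v => v.1 == k)).map (fun v => v.2)) (fun q => q.1) (fun q => q.2))) := by
    show PySem.List.sorted (PySem.Dict.mk _).items (fun p => p.1) = _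
    rw [hfold]
    show PySem.List.sorted (groups.items.map (fun p => (p.1, PySem.List.sorted2 p.2 (fun q => q.1) (fun q => q.2)))) (fun p => p.1) = _
    rw [hitems, List.map_map]
    apply PySem.List.sorted_eq_of_perm_of_pairwise_lt
    · exact (PySem.List.sorted_perm _ _ _).map _
    · rw [List.pairwise_map]
      exact PySem.List.sorted_ofList_pairwise_lt _
  -- ===== B's side =====
  have hB : group_by_y_alt uses t = ((groupRuns S).map (fun p => p.1)).map
      (fun k => (k, (S.filter (fun v => v.1 == k)).map (fun v => v.2))) := by
    show groupRuns S = _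
    rw [List.map_map]
    have h1 : ∀ p ∈ groupRuns S,
        ((fun k => (k, (S.filter (fun v => v.1 == k)).map (fun v => v.2))) ∘ (fun p => p.1)) p = id p := by
      intro p hp
      have h2 := hgrpB p hp
      simp only [Function.comp, id]
      rw [← h2]
    rw [List.map_congr_left h1, List.map_id]
  -- ===== the two key lists coincide =====
  have hkeq : (groupRuns S).map (fun p => p.1) = ks := by
    apply keys_unique _ _ hpwB (PySem.List.sorted_ofList_pairwise_lt _)
    intro k
    rw [hmemB k, PySem.List.mem_sorted, PySem.Set.mem_ofList]
    constructor
    · intro hk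
      rcases List.mem_map.mp hk with ⟨v, hv, rfl⟩
      exact List.mem_map_of_mem ((PySem.List.mem_sorted dec lexKey false v).mp hv)
    · intro hk
      rcases List.mem_map.mp hk with ⟨v, hv, rfl⟩
      exact List.mem_map_of_mem ((PySem.List.mem_sorted dec lexKey false v).mpr hv)
  rw [hA, hB, hkeq]
  exact (List.map_congr_left (fun k _ => by
    rw [sorted2_pairs_eq, bucket_eq])).symm
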